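-- pv_equiv track=rewrite | github.com/gyunih0/algorithm | maximum_depth_of_binary_tree.py | maximum_depth
-- ===== SOURCE A (Python) =====
-- from typing import List
--
-- def maximum_depth(Tree: List) -> int:
--     level = 0
--     count = 0
--     max_node = 1
--
--     for node in Tree:
--         count += 1
--         if count == max_node:
--             level += 1
--             count = 0
--             max_node = 2 ** level
--
--     return level
-- ===== SOURCE B (Python) =====
-- def maximum_depth(Tree):
--     # closed form: number of complete levels of a complete binary tree with
--     # len(Tree) nodes is floor(log2(len(Tree)+1)) = (n+1).bit_length() - 1
--     return (len(Tree) + 1).bit_length() - 1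
-- ===== Notes on version B (the rewrite author's own statement) =====
-- stated objective: faster
-- what changed: Replaced the level-by-level counting loop over the node list with the closed form (len(Tree)+1).bit_length()-1 = floor(log2(n+1)).
import Mathlib
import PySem

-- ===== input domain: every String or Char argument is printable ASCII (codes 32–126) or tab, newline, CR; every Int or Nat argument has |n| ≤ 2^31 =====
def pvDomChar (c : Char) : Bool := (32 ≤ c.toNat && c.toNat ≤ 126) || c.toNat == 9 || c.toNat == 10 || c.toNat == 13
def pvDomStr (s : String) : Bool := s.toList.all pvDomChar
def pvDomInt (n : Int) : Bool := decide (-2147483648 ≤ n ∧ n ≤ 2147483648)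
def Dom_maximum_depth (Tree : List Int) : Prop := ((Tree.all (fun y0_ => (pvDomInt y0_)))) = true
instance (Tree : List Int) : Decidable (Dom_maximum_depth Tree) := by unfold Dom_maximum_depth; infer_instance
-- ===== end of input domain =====

-- B replaces A's per-node level-counting loop by the closed form floor(log2(n+1)) (objective: faster).

-- ===== PORT A =====
-- A's loop body; state = (level, count, max_node).  '2 ** level' with level ≥ 0: ported
-- as (level + 1).toNat exponent, exact since level stays nonnegative throughout.
def mdStep (s : Int × Int × Int) (_node : Int) : Int × Int × Int :=
  let level := s.1
  let count := s.2.1 + 1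
  let max_node := s.2.2
  if count = max_node then (level + 1, 0, 2 ^ (level + 1).toNat) else (level, count, max_node)

def maximum_depth (Tree : List Int) : Int :=
  (Tree.foldl mdStep (0, 0, 1)).1

-- ===== PORT B =====
-- transliteration of Source B: (len(Tree)+1).bit_length() - 1; for m ≥ 1, m.bit_length() = Nat.log2 m + 1
def maximum_depth_alt (Tree : List Int) : Int :=
  ((Nat.log2 (Tree.length + 1) + 1 : Nat) : Int) - 1

-- ===== PRECONDITION & SPEC =====
def Spec_maximum_depth (Tree : List Int) (out : Int) : Prop := out = maximum_depth_alt Tree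
instance (Tree : List Int) (out : Int) : Decidable (Spec_maximum_depth Tree out) := by unfold Spec_maximum_depth; infer_instance

-- ===== CLAIM (what is proved, stated in full; the proofs are below) =====
def Claim_equal_maximum_depth : Prop := ∀ (Tree : List Int), Dom_maximum_depth Tree → Spec_maximum_depth Tree (maximum_depth Tree)

-- ===== LEMMAS AND PROOFS =====

-- the exact state of A's loop after consuming n nodes
def mdState (n : Nat) : Int × Int × Int :=
  ((Nat.log2 (n + 1) : Int), ((n + 1 - 2 ^ Nat.log2 (n + 1) : Nat) : Int), (2 : Int) ^ Nat.log2 (n + 1))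

lemma mdStep_state (n : Nat) (x : Int) : mdStep (mdState n) x = mdState (n + 1) := by
  have h1 : 2 ^ Nat.log2 (n + 1) ≤ n + 1 := Nat.log2_self_le (Nat.succ_ne_zero n)
  have h2 : n + 1 < 2 ^ (Nat.log2 (n + 1) + 1) := Nat.lt_log2_self
  set k := Nat.log2 (n + 1) with hk
  have hp : 2 ^ (k + 1) = 2 * 2 ^ k := by rw [pow_succ]; ring
  have hcast : ((2 : Int) ^ k) = ((2 ^ k : Nat) : Int) := by push_cast; ring
  by_cases hc : n + 1 + 1 = 2 ^ (k + 1)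
  · have hlog : Nat.log2 (n + 1 + 1) = k + 1 := by
      rw [Nat.log2_eq_log_two]
      exact Nat.log_eq_of_pow_le_of_lt_pow (by omega) (by rw [pow_succ]; omega)
    have hcond : ((n + 1 - 2 ^ k : Nat) : Int) + 1 = (2 : Int) ^ k := by
      rw [hcast]; omega
    have e1 : ((k : Int) + 1).toNat = k + 1 := by omega
    have e2 : n + 1 + 1 - 2 ^ (k + 1) = 0 := by omega
    simp only [mdStep, mdState, hlog, ← hk]
    rw [if_pos hcond, e1, e2]
    refine Prod.ext (by push_cast; ring) (Prod.ext (by simp) rfl)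
  · have hlog : Nat.log2 (n + 1 + 1) = k := by
      rw [Nat.log2_eq_log_two]
      exact Nat.log_eq_of_pow_le_of_lt_pow (by omega) (by omega)
    have hcond : ¬ (((n + 1 - 2 ^ k : Nat) : Int) + 1 = (2 : Int) ^ k) := by
      rw [hcast]; omega
    simp only [mdStep, mdState, hlog, ← hk]
    rw [if_neg hcond]
    refine Prod.ext rfl (Prod.ext (by push_cast; omega) rfl)

lemma md_foldl (l : List Int) : l.foldl mdStep (0, 0, 1) = mdState l.length := by
  induction l using List.reverseRecOn with
  | nil => decide
  | append_singleton l x ih =>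
      rw [List.foldl_append, ih]
      simp [mdStep_state]

-- ===== VERDICT (by name: the statement is the Claim_ definition above) =====
theorem maximum_depth_spec : Claim_equal_maximum_depth := by
  intro Tree _
  unfold Spec_maximum_depth maximum_depth maximum_depth_alt
  rw [md_foldl]
  simp [mdState]
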